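-- pv_equiv track=rewrite | github.com/jjar7266/100_Exercises_Practicing_Python | Advanced_Exercises/exercise100.py | separateElements_Beginner
-- ===== SOURCE A (Python) =====
-- def separateElements_Beginner(L):
--     zeros = []
--     ones = []
--     for value in L:
--         if value == 0:
--             zeros.append(0)
--         else:
--             ones.append(1)
--     return zeros + ones
-- ===== SOURCE B (Python) =====
-- def separateElements_Beginner(L):
--     zc = L.count(0)
--     return [0] * zc + [1] * (len(L) - zc)
-- ===== Notes on version B (the rewrite author's own statement) =====
-- stated objective: simpler
-- what changed: Replaces the branch-and-append partition loop with a count-then-construct strategy: count zeros once, then build [0]*zc + [1]*(len-zc) directly.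
import Mathlib
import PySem

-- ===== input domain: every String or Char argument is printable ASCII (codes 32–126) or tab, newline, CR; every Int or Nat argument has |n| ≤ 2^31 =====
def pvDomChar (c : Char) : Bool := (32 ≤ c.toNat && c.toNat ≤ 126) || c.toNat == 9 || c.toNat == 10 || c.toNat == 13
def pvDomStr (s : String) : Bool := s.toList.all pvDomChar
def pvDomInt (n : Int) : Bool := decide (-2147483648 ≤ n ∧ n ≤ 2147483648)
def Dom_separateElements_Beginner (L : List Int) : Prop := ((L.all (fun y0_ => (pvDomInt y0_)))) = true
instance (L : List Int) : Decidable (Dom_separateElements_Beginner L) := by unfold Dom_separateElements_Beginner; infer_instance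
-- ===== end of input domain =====

-- B replaces A's branch-and-append partition loop with count-then-construct (objective: simpler).

-- ===== PORT A =====
-- A: loop over L appending 0 to `zeros` or 1 to `ones`, then return zeros + ones.
def separateElements_Beginner (L : List Int) : List Int :=
  let st := L.foldl (fun (acc : List Int × List Int) value =>
    if value == 0 then (acc.1 ++ [0], acc.2) else (acc.1, acc.2 ++ [1])) ([], [])
  st.1 ++ st.2

-- ===== PORT B =====
-- B: zc = L.count(0); [0]*zc + [1]*(len(L)-zc)
def separateElements_Beginner_alt (L : List Int) : List Int :=
  let zc := PySem.List.count L 0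
  List.replicate zc 0 ++ List.replicate (L.length - zc) 1

-- ===== PRECONDITION & SPEC =====
def Spec_separateElements_Beginner (L : List Int) (out : List Int) : Prop := out = separateElements_Beginner_alt L
instance (L : List Int) (out : List Int) : Decidable (Spec_separateElements_Beginner L out) := by unfold Spec_separateElements_Beginner; infer_instance

-- ===== CLAIM (what is proved, stated in full; the proofs are below) =====
def Claim_equal_separateElements_Beginner : Prop := ∀ (L : List Int), Dom_separateElements_Beginner L → Spec_separateElements_Beginner L (separateElements_Beginner L)

-- ===== LEMMAS AND PROOFS =====

-- A's loop state, named for the proofs.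
def pvSepFold (L : List Int) : List Int × List Int :=
  L.foldl (fun (acc : List Int × List Int) value =>
    if value == 0 then (acc.1 ++ [0], acc.2) else (acc.1, acc.2 ++ [1])) ([], [])

-- A's loop starting from (zs, os) just appends the partition of the rest.
theorem sep_foldl_append (L : List Int) (zs os : List Int) :
    L.foldl (fun (acc : List Int × List Int) value =>
      if value == 0 then (acc.1 ++ [0], acc.2) else (acc.1, acc.2 ++ [1])) (zs, os)
    = (zs ++ (pvSepFold L).1, os ++ (pvSepFold L).2) := by
  induction L generalizing zs os with
  | nil => simp [pvSepFold]
  | cons x xs ih =>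
    simp only [pvSepFold, List.foldl_cons, beq_iff_eq] at *
    by_cases hx : x = 0
    · rw [if_pos hx, if_pos hx, ih (zs ++ [0]) os, ih ([] ++ [0]) []]
      simp
    · rw [if_neg hx, if_neg hx, ih zs (os ++ [1]), ih [] ([] ++ [1])]
      simp

theorem sepFold_fst (L : List Int) :
    (pvSepFold L).1 = List.replicate (List.count 0 L) 0 := by
  induction L with
  | nil => rfl
  | cons x xs ih =>
    simp only [pvSepFold, List.foldl_cons]
    by_cases hx : x = 0
    · rw [if_pos (by simp [hx] : (x == (0:Int)) = true), sep_foldl_append]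
      simp [hx, ih, List.replicate_succ]
    · rw [if_neg (by simp [hx] : ¬ ((x == (0:Int)) = true)), sep_foldl_append]
      simp [ih, List.count_cons]
      exact hx

theorem sepFold_snd (L : List Int) :
    (pvSepFold L).2 = List.replicate (L.length - List.count 0 L) 1 := by
  induction L with
  | nil => rfl
  | cons x xs ih =>
    have hc : List.count 0 xs ≤ xs.length := List.count_le_length
    simp only [pvSepFold, List.foldl_cons]
    by_cases hx : x = 0
    · rw [if_pos (by simp [hx] : (x == (0:Int)) = true), sep_foldl_append]
      simp [hx, ih, Nat.succ_sub_succ]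
    · rw [if_neg (by simp [hx] : ¬ ((x == (0:Int)) = true)), sep_foldl_append]
      simp [ih, List.count_cons]
      rw [if_neg hx,
        show xs.length + 1 - (List.count 0 xs + 0) = (xs.length - List.count 0 xs) + 1 from by omega,
        List.replicate_succ]

theorem sep_eq_alt (L : List Int) :
    separateElements_Beginner L = separateElements_Beginner_alt L := by
  show (pvSepFold L).1 ++ (pvSepFold L).2 = _
  rw [sepFold_fst, sepFold_snd]
  simp [separateElements_Beginner_alt, PySem.List.count, List.count]

-- ===== VERDICT (by name: the statement is the Claim_ definition above) =====
theorem separateElements_Beginner_spec : Claim_equal_separateElements_Beginner := by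
  intro L _
  exact sep_eq_alt L
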